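-- pv_equiv track=rewrite | github.com/dauletkali/algo | give-a-check.py | checkUpLeft
-- ===== SOURCE A (Python) =====
-- def checkUpLeft(row,col,board,color):
-- 	figures = ""
-- 	if color == "white": figures = "qb"
-- 	else: figures = "QB"
-- 	if row == 0 or col == 0:
-- 		if board[row][col] in figures:
-- 			return True
-- 	else:
-- 		if board[row][col] == "#":
-- 			return checkUpLeft(row-1,col-1,board,color)
-- 		if board[row][col] in figures:
-- 			return True
-- 	return False
-- ===== SOURCE B (Python) =====
-- def checkUpLeft(row, col, board, color):
--     figures = "qb" if color == "white" else "QB"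
--     while row != 0 and col != 0 and board[row][col] == "#":
--         row -= 1
--         col -= 1
--     return board[row][col] in figures
-- ===== Notes on version B (the rewrite author's own statement) =====
-- stated objective: idiomatic
-- what changed: The recursive diagonal walk is replaced by an explicit while-loop that steps (row,col) up-left and ends with a single 'cell in figures' test, collapsing A's duplicated True/False branch structure.
-- outside the precondition, e.g. on checkUpLeft(-1, -1, [['q', '#'], ['x', '#']], 'white'): A returns True, B returns True; on checkUpLeft(1, 1, [['q'], ['x', '#']], 'white'): A returns True, B returns True
import Mathlib
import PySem

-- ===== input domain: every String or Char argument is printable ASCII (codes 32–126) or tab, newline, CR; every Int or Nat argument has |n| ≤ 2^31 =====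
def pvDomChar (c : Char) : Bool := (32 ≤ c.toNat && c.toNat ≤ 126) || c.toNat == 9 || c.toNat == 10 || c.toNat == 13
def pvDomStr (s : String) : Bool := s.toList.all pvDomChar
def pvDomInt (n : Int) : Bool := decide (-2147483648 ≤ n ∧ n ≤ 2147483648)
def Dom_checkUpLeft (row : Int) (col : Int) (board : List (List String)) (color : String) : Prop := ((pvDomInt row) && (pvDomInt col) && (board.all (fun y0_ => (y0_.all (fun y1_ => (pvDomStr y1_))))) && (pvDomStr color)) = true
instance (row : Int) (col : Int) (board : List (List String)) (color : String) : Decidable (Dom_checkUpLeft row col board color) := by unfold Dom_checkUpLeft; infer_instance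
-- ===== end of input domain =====

-- B rewrites A's recursive up-left diagonal walk as an explicit while-loop with a single final membership test (idiomatic; same cost).
-- ===== PORT A =====
-- recursive helper: the body of A with figures already computed (A recomputes figures each call to the same value)
def checkALoop (board : List (List String)) (figures : String) (row : Int) (col : Int) : Bool :=
  match hr : PySem.List.pyGet? board row with
  | none => false  -- IndexError in Python; excluded by Pre_
  | some r =>
    match PySem.List.pyGet? r col with
    | none => false  -- IndexError in Python; excluded by Pre_
    | some cell =>
      if row = 0 ∨ col = 0 then
        PySem.Str.isIn cell figures
      else if cell = "#" then
        checkALoop board figures (row - 1) (col - 1)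
      else
        PySem.Str.isIn cell figures
termination_by (row + board.length + 1).toNat
decreasing_by
  have h : PySem.Raise.InRange board.length row := by
    by_contra hn
    have := (PySem.List.pyGet?_eq_none_iff (xs := board) (i := row)).mpr hn
    simp [hr] at this
  simp [PySem.Raise.InRange] at h
  omega

def checkUpLeft (row : Int) (col : Int) (board : List (List String)) (color : String) : Bool :=
  let figures : String := if color == "white" then "qb" else "QB"
  checkALoop board figures row col

-- ===== PORT B =====
-- board[row][col] as an Option (none = IndexError)
def cellAt (board : List (List String)) (row : Int) (col : Int) : Option String :=
  (PySem.List.pyGet? board row).bind (fun r => PySem.List.pyGet? r col)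

-- the while-loop of B: step up-left while row != 0 and col != 0 and board[row][col] == "#"
def altLoop (board : List (List String)) (figures : String) (row : Int) (col : Int) : Bool :=
  if h : row ≠ 0 ∧ col ≠ 0 ∧ cellAt board row col = some "#" then
    altLoop board figures (row - 1) (col - 1)
  else
    match cellAt board row col with
    | none => false  -- IndexError in Python; excluded by Pre_
    | some cell => PySem.Str.isIn cell figures
termination_by (row + board.length + 1).toNat
decreasing_by
  obtain ⟨-, -, hc⟩ := h
  obtain ⟨r, hr, -⟩ := Option.bind_eq_some_iff.mp hc
  have h2 : PySem.Raise.InRange board.length row := by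
    by_contra hn
    have := (PySem.List.pyGet?_eq_none_iff (xs := board) (i := row)).mpr hn
    simp [hr] at this
  simp [PySem.Raise.InRange] at h2
  omega

def checkUpLeft_alt (row : Int) (col : Int) (board : List (List String)) (color : String) : Bool :=
  let figures : String := if color == "white" then "qb" else "QB"
  altLoop board figures row col

-- ===== PRECONDITION & SPEC =====
-- Pre_ excludes inputs where Python A raises IndexError, and conservatively also walks that step
-- through "#" cells from negative indices or over a too-short row, where Python's negative-index
-- wraparound makes staying in range content-dependent; where A still returns there (see cites) B
-- returns the identical value.
def Pre_checkUpLeft (row : Int) (col : Int) (board : List (List String)) (color : String) : Prop :=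
  cellAt board row col ≠ none ∧
    (row = 0 ∨ col = 0 ∨ cellAt board row col ≠ some "#" ∨
      (0 ≤ row ∧ 0 ≤ col ∧ ∀ r ∈ board, col < (r.length : Int)))
instance (row : Int) (col : Int) (board : List (List String)) (color : String) : Decidable (Pre_checkUpLeft row col board color) := by unfold Pre_checkUpLeft; infer_instance

def pvWitness_checkUpLeft : Int × Int × List (List String) × String := (0, 0, [["q"]], "white")

def Spec_checkUpLeft (row : Int) (col : Int) (board : List (List String)) (color : String) (out : Bool) : Prop := out = checkUpLeft_alt row col board color
instance (row : Int) (col : Int) (board : List (List String)) (color : String) (out : Bool) : Decidable (Spec_checkUpLeft row col board color out) := by unfold Spec_checkUpLeft; infer_instance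

-- ===== CLAIM (what is proved, stated in full; the proofs are below) =====
def Claim_equal_checkUpLeft : Prop := ∀ (row : Int) (col : Int) (board : List (List String)) (color : String), Dom_checkUpLeft row col board color → Pre_checkUpLeft row col board color → Spec_checkUpLeft row col board color (checkUpLeft row col board color)

-- ===== LEMMAS AND PROOFS =====
-- A's recursion and B's loop agree at every state (even where both hit the excluded IndexError states):
-- strong induction on the termination measure.
theorem loop_eq (board : List (List String)) (figures : String) :
    ∀ (n : Nat) (row col : Int), (row + board.length + 1).toNat = n →
      checkALoop board figures row col = altLoop board figures row col := by
  intro n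
  induction n using Nat.strong_induction_on with
  | _ n ih =>
    intro row col hn
    rw [checkALoop]
    split
    next hr =>
      -- board[row] raises: both sides are false
      rw [altLoop, dif_neg (by simp [cellAt, hr])]
      simp [cellAt, hr]
    next r hr =>
      split
      next hc =>
        -- board[row][col] raises: both sides are false
        rw [altLoop, dif_neg (by simp [cellAt, hr, hc])]
        simp [cellAt, hr, hc]
      next cell hc =>
        have hcell : cellAt board row col = some cell := by simp [cellAt, hr, hc]
        split_ifs with he hh
        · -- edge of the board: both sides test membership
          rw [altLoop, dif_neg (by tauto)]
          simp [hcell]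
        · -- empty square off the edge: both sides step up-left; induction hypothesis
          have hcond : row ≠ 0 ∧ col ≠ 0 ∧ cellAt board row col = some "#" :=
            ⟨by tauto, by tauto, by rw [hcell, hh]⟩
          rw [altLoop, dif_pos hcond]
          have hin : PySem.Raise.InRange board.length row := by
            by_contra hn2
            have := (PySem.List.pyGet?_eq_none_iff (xs := board) (i := row)).mpr hn2
            simp [hr] at this
          simp [PySem.Raise.InRange] at hin
          exact ih (row - 1 + board.length + 1).toNat (by omega) (row - 1) (col - 1) rfl
        · -- occupied square off the edge: both sides test membership
          have hnc : ¬ (row ≠ 0 ∧ col ≠ 0 ∧ cellAt board row col = some "#") := by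
            rintro ⟨-, -, h3⟩
            rw [hcell] at h3
            exact hh (by simpa using h3)
          rw [altLoop, dif_neg hnc]
          simp [hcell]

-- ===== VERDICT (by name: the statement is the Claim_ definition above) =====
theorem checkUpLeft_spec : Claim_equal_checkUpLeft := by
  intro row col board color _ _
  unfold Spec_checkUpLeft checkUpLeft checkUpLeft_alt
  exact loop_eq board _ _ row col rfl
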